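-- pv_equiv track=rewrite | github.com/protofu/baek_algo | 프로그래머스/1/42862. 체육복/체육복.py | solution
-- ===== SOURCE A (Python) =====
-- def solution(n, lost, reserve):
--     answer = 0
--     visited = [0] + [1]*(n) + [0]
--
--     # 체육복 챙겨넣기
--     for i in range(1, n+1):
--         if i in reserve:
--             visited[i] += 1
--         if i in lost:
--             visited[i] -= 1
--
--     # 1번 학생부터 순차로
--     for i in range(1, n+1):
--         # 체육복이 없는 경우
--         if visited[i] == 0:
--             # 앞사람 먼저 찾아보기
--             if visited[i-1] == 2:
--                 visited[i] += 1
--                 visited[i-1] -= 1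
--             # 그다음 뒷사람
--             elif visited[i+1] ==2:
--                 visited[i] += 1
--                 visited[i+1] -= 1
--         # 모든 처리 후 0 초과면 +1
--         if visited[i] > 0:
--             answer+= 1
--
--
--
--     return answer
-- ===== SOURCE B (Python) =====
-- def solution(n, lost, reserve):
--     give = {x for x in reserve if 1 <= x <= n and x not in lost}
--     need = sorted({x for x in lost if 1 <= x <= n and x not in reserve})
--     unserved = 0
--     for i in need:
--         if i - 1 in give:
--             give.remove(i - 1)
--         elif i + 1 in give:
--             give.remove(i + 1)
--         else:
--             unserved += 1
--     return n - unserved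
-- ===== Notes on version B (the rewrite author's own statement) =====
-- stated objective: idiomatic
-- what changed: Replaces the count array and the two full 1..n sweeps by set arithmetic: give = in-range reserve minus lost, need = sorted in-range lost minus reserve, then a greedy loop only over the lost students (left neighbour first), returning n minus the unserved count.
-- outside the precondition, e.g. on solution(-2, [1], []): A returns 0, B returns -2
import Mathlib
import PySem

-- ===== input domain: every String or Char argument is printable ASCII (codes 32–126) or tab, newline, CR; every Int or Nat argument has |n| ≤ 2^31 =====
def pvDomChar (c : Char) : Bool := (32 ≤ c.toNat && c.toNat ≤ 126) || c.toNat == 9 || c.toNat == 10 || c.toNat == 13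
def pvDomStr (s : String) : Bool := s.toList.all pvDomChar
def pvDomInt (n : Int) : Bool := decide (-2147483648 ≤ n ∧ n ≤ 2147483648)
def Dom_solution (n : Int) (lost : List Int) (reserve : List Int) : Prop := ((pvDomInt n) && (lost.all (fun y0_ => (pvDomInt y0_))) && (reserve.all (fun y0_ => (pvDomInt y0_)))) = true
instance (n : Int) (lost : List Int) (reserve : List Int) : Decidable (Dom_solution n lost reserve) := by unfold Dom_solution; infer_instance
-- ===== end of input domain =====

-- B replaces A's count array and its two full 1..n sweeps by set arithmetic (give/need sets,
-- a greedy loop only over the sorted need set, left neighbour first): an idiomatic alternative.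

-- ===== PORT A =====
-- Python's list is an array; visited is kept as Array Int. Its indices are always in
-- [0, n+1] here, so the total getD/setIfInBounds forms are exact.
def pvGet (a : Array Int) (i : Int) : Int := a.getD i.toNat 0
def pvSet (a : Array Int) (i : Int) (x : Int) : Array Int := a.setIfInBounds i.toNat x

-- loop body of A's first sweep: visited[i] += 1 if i in reserve; visited[i] -= 1 if i in lost
def pvFill (lost reserve : List Int) (v : Array Int) (i : Int) : Array Int :=
  let v := if i ∈ reserve then pvSet v i (pvGet v i + 1) else v
  if i ∈ lost then pvSet v i (pvGet v i - 1) else v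

-- loop body of A's second sweep, state (visited, answer)
def pvServe (st : Array Int × Int) (i : Int) : Array Int × Int :=
  let v := st.1
  let v :=
    if pvGet v i = 0 then
      if pvGet v (i-1) = 2 then
        let v := pvSet v i (pvGet v i + 1)
        pvSet v (i-1) (pvGet v (i-1) - 1)
      else if pvGet v (i+1) = 2 then
        let v := pvSet v i (pvGet v i + 1)
        pvSet v (i+1) (pvGet v (i+1) - 1)
      else v
    else v
  (v, if pvGet v i > 0 then st.2 + 1 else st.2)

def solution (n : Int) (lost : List Int) (reserve : List Int) : Int :=
  let visited : Array Int := ([(0:Int)] ++ List.replicate n.toNat 1 ++ [0]).toArray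
  let visited := (PySem.List.pyRange 1 (n+1) 1).foldl (pvFill lost reserve) visited
  ((PySem.List.pyRange 1 (n+1) 1).foldl pvServe (visited, 0)).2

-- ===== PORT B =====
-- loop body of B, state (give set, unserved count); give.remove(x) is guarded by 'x in give',
-- so the total form (remove? …).getD is exact here
def pvLend (st : PySem.Set Int × Int) (i : Int) : PySem.Set Int × Int :=
  if (i-1) ∈ st.1 then ((PySem.Set.remove? st.1 (i-1)).getD st.1, st.2)
  else if (i+1) ∈ st.1 then ((PySem.Set.remove? st.1 (i+1)).getD st.1, st.2)
  else (st.1, st.2 + 1)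

def solution_alt (n : Int) (lost : List Int) (reserve : List Int) : Int :=
  let give : PySem.Set Int := PySem.Set.ofList (reserve.filter (fun x => decide (1 ≤ x ∧ x ≤ n ∧ x ∉ lost)))
  let need := PySem.List.sorted (PySem.Set.ofList (lost.filter (fun x => decide (1 ≤ x ∧ x ≤ n ∧ x ∉ reserve)))) (fun x => x) false
  n - (need.foldl pvLend (give, 0)).2

-- ===== PRECONDITION & SPEC =====
-- Pre_ excludes negative n, which is outside the problem's natural domain of n ≥ 0 students;
-- there A still returns 0 while B's natural 'n - unserved' returns n.
def Pre_solution (n : Int) (lost : List Int) (reserve : List Int) : Prop := 0 ≤ n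
instance (n : Int) (lost : List Int) (reserve : List Int) : Decidable (Pre_solution n lost reserve) := by unfold Pre_solution; infer_instance
def pvWitness_solution : Int × List Int × List Int := (4, [2, 4], [3])

def Spec_solution (n : Int) (lost : List Int) (reserve : List Int) (out : Int) : Prop := out = solution_alt n lost reserve
instance (n : Int) (lost : List Int) (reserve : List Int) (out : Int) : Decidable (Spec_solution n lost reserve out) := by unfold Spec_solution; infer_instance

-- ===== CLAIM (what is proved, stated in full; the proofs are below) =====
def Claim_equal_solution : Prop := ∀ (n : Int) (lost : List Int) (reserve : List Int), Dom_solution n lost reserve → Pre_solution n lost reserve → Spec_solution n lost reserve (solution n lost reserve)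

-- ===== LEMMAS AND PROOFS =====

lemma size_pvSet (a : Array Int) (i v : Int) : (pvSet a i v).size = a.size := by
  unfold pvSet; exact Array.size_setIfInBounds

-- get-after-set for nonnegative Int indices
lemma pvGet_pvSet (a : Array Int) (i m v : Int) (hi : 0 ≤ i) (hm : 0 ≤ m)
    (hlt : i.toNat < a.size) :
    pvGet (pvSet a i v) m = if m = i then v else pvGet a m := by
  unfold pvGet pvSet
  rw [Array.getD_eq_getD_getElem?, Array.getD_eq_getD_getElem?, Array.getElem?_setIfInBounds]
  by_cases h : i.toNat = m.toNat
  · rw [if_pos h, if_pos hlt, if_pos (by omega)]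
    simp
  · rw [if_neg h, if_neg (by omega)]

-- the initial visited array, pointwise
lemma pvGet_vInit (n j : Int) (hj : 0 ≤ j) :
    pvGet (([(0:Int)] ++ List.replicate n.toNat 1 ++ [0]).toArray) j
      = if 1 ≤ j ∧ j ≤ n then 1 else 0 := by
  obtain ⟨p, rfl⟩ : ∃ p : Nat, j = (p : Int) := ⟨j.toNat, by omega⟩
  have ht : ((p : Int)).toNat = p := by omega
  unfold pvGet
  rw [Array.getD_eq_getD_getElem?, ht]
  have harr : (([(0:Int)] ++ List.replicate n.toNat 1 ++ [0]).toArray)[p]?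
      = ([(0:Int)] ++ List.replicate n.toNat 1 ++ [0])[p]? := by simp
  rw [harr]
  rcases Nat.eq_zero_or_pos p with hp | hp
  · subst hp; simp
  · by_cases hle : (p : Int) ≤ n
    · rw [List.getElem?_append_left (by simp; omega),
          List.getElem?_append_right (by simp; omega)]
      have h2 : p - 1 < n.toNat := by omega
      have h3 : (1 ≤ (p:Int) ∧ (p:Int) ≤ n) := by omega
      simp [h2, h3]
    · rw [List.getElem?_append_right (by simp; omega)]
      have h3 : ¬(1 ≤ (p:Int) ∧ (p:Int) ≤ n) := by omega
      rw [if_neg h3]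
      rcases Nat.lt_or_ge (p - ([(0:Int)] ++ List.replicate n.toNat 1).length) 1 with h | h
      · have h4 : p - ([(0:Int)] ++ List.replicate n.toNat 1).length = 0 := by omega
        rw [h4]; simp
      · rw [List.getElem?_eq_none (by simpa using h)]; simp

lemma size_pvFill (lost reserve : List Int) (v : Array Int) (i : Int) :
    (pvFill lost reserve v i).size = v.size := by
  unfold pvFill; split_ifs <;> simp [size_pvSet]

lemma pvGet_pvFill (lost reserve : List Int) (v : Array Int) (a j : Int)
    (ha : 0 ≤ a) (hj : 0 ≤ j) (hlt : a.toNat < v.size) :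
    pvGet (pvFill lost reserve v a) j
      = if j = a then
          pvGet v a + (if a ∈ reserve then 1 else 0) - (if a ∈ lost then 1 else 0)
        else pvGet v j := by
  unfold pvFill
  by_cases hr : a ∈ reserve <;> by_cases hl : a ∈ lost <;> simp only [hr, hl, if_true, if_false]
  · rw [pvGet_pvSet _ _ _ _ ha hj (by rw [size_pvSet]; exact hlt),
        pvGet_pvSet _ _ _ _ ha ha hlt]
    by_cases h : j = a
    · simp [h]
    · rw [if_neg h, if_neg h, pvGet_pvSet _ _ _ _ ha hj hlt, if_neg h]
  · rw [pvGet_pvSet _ _ _ _ ha hj hlt]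
    split_ifs <;> ring_nf
  · rw [pvGet_pvSet _ _ _ _ ha hj hlt]
    split_ifs <;> ring_nf
  · split_ifs <;> simp_all

-- first sweep: pointwise characterization
lemma fill_spec (n : Int) (lost reserve : List Int) :
    ∀ (m : Nat) (a : Int) (v : Array Int), a = n + 1 - m → 1 ≤ a →
      v.size = (n + 2).toNat →
      ((PySem.List.pyRange a (n+1) 1).foldl (pvFill lost reserve) v).size = (n + 2).toNat ∧
      ∀ j, 0 ≤ j →
        pvGet ((PySem.List.pyRange a (n+1) 1).foldl (pvFill lost reserve) v) j
          = if a ≤ j ∧ j ≤ n then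
              pvGet v j + (if j ∈ reserve then 1 else 0) - (if j ∈ lost then 1 else 0)
            else pvGet v j := by
  intro m
  induction m with
  | zero =>
    intro a v ha h1 hlen
    rw [PySem.List.pyRange_one_eq_nil (by omega)]
    refine ⟨hlen, ?_⟩
    intro j hj
    rw [if_neg (by omega)]
    simp
  | succ m ih =>
    intro a v ha h1 hlen
    rw [PySem.List.pyRange_one_cons (by omega)]
    simp only [List.foldl_cons]
    have hlt : a.toNat < v.size := by omega
    obtain ⟨ihlen, ihget⟩ := ih (a+1) (pvFill lost reserve v a) (by omega) (by omega)
      (by rw [size_pvFill]; exact hlen)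
    refine ⟨ihlen, ?_⟩
    intro j hj
    rw [ihget j hj, pvGet_pvFill lost reserve v a j (by omega) hj hlt]
    by_cases hja : j = a
    · subst hja
      rw [if_neg (show ¬(j + 1 ≤ j ∧ j ≤ n) by omega), if_pos rfl,
          if_pos (show j ≤ j ∧ j ≤ n by omega)]
    · simp only [if_neg hja]
      by_cases hc : a + 1 ≤ j ∧ j ≤ n
      · rw [if_pos hc, if_pos (show a ≤ j ∧ j ≤ n from ⟨by omega, hc.2⟩)]
      · rw [if_neg hc, if_neg (show ¬(a ≤ j ∧ j ≤ n) by omega)]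

-- pvServe on a student who needs clothes and borrows from the left neighbour
lemma pvServe_left (v : Array Int) (ans k : Int) (h0 : pvGet v k = 0)
    (hl : pvGet v (k-1) = 2) (hk : 1 ≤ k) (hkl : k.toNat < v.size) :
    pvServe (v, ans) k = (pvSet (pvSet v k 1) (k-1) 1, ans + 1) := by
  have h1 : pvGet (pvSet v k 1) (k-1) = 2 := by
    rw [pvGet_pvSet _ _ _ _ (by omega) (by omega) hkl, if_neg (by omega), hl]
  have h2 : pvGet (pvSet (pvSet v k 1) (k-1) 1) k = 1 := by
    rw [pvGet_pvSet _ _ _ _ (by omega) (by omega)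
          (by rw [size_pvSet]; omega),
        if_neg (by omega), pvGet_pvSet _ _ _ _ (by omega) (by omega) hkl, if_pos rfl]
  simp only [pvServe]
  rw [h0, hl]
  norm_num
  rw [h1]
  norm_num
  rw [h2]
  norm_num

-- pvServe on a student who needs clothes and borrows from the right neighbour
lemma pvServe_right (v : Array Int) (ans k : Int) (h0 : pvGet v k = 0)
    (hl : pvGet v (k-1) ≠ 2) (hr : pvGet v (k+1) = 2)
    (hk : 1 ≤ k) (hkl : k.toNat < v.size) (hkl2 : (k+1).toNat < v.size) :
    pvServe (v, ans) k = (pvSet (pvSet v k 1) (k+1) 1, ans + 1) := by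
  have h1 : pvGet (pvSet v k 1) (k+1) = 2 := by
    rw [pvGet_pvSet _ _ _ _ (by omega) (by omega) hkl, if_neg (by omega), hr]
  have h2 : pvGet (pvSet (pvSet v k 1) (k+1) 1) k = 1 := by
    rw [pvGet_pvSet _ _ _ _ (by omega) (by omega)
          (by rw [size_pvSet]; omega),
        if_neg (by omega), pvGet_pvSet _ _ _ _ (by omega) (by omega) hkl, if_pos rfl]
  simp only [pvServe]
  rw [h0, if_neg hl, hr]
  norm_num
  rw [h1]
  norm_num
  rw [h2]
  norm_num

-- pvServe on a student who needs clothes and finds no lender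
lemma pvServe_none (v : Array Int) (ans k : Int) (h0 : pvGet v k = 0)
    (hl : pvGet v (k-1) ≠ 2) (hr : pvGet v (k+1) ≠ 2) :
    pvServe (v, ans) k = (v, ans) := by
  simp only [pvServe]
  rw [h0, if_neg hl, if_neg hr]
  norm_num
  omega

-- pvServe on a student who already has clothes
lemma pvServe_has (v : Array Int) (ans k : Int) (h0 : 0 < pvGet v k) :
    pvServe (v, ans) k = (v, ans + 1) := by
  unfold pvServe
  simp only [if_neg (by omega : ¬ pvGet v k = 0)]
  simp [h0]

-- pvLend fold: the unserved count is additive in its start value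
lemma lend_shift (l : List Int) (G : PySem.Set Int) (u : Int) :
    l.foldl pvLend (G, u) = ((l.foldl pvLend (G, 0)).1, u + (l.foldl pvLend (G, 0)).2) := by
  induction l generalizing G u with
  | nil => simp
  | cons x t ih =>
    simp only [List.foldl_cons]
    have hx : pvLend (G, u) x = ((pvLend (G, 0) x).1, u + (pvLend (G, 0) x).2) := by
      unfold pvLend; split_ifs <;> simp
    rw [hx, ih, ih (pvLend (G, 0) x).1 (pvLend (G, 0) x).2]
    rcases h : pvLend (G, 0) x with ⟨G', u'⟩
    simp; ring

-- main simulation: A's second sweep from position k equals B's greedy on the remaining need list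
lemma main_sim (n : Int) (lost reserve : List Int) :
    ∀ (m : Nat) (k : Int) (v : Array Int) (G : PySem.Set Int) (need : List Int) (ans : Int),
      k = n + 1 - m → 1 ≤ k → v.size = (n + 2).toNat →
      (∀ j, 0 ≤ j → j ≤ n + 1 → k - 1 ≤ j → (pvGet v j = 2 ↔ j ∈ G)) →
      (∀ j, k ≤ j → j ≤ n →
        pvGet v j = (if j ∈ lost ∧ j ∉ reserve then 0 else if j ∈ G then 2 else 1)) →
      (∀ j ∈ G, 1 ≤ j ∧ j ≤ n ∧ j ∈ reserve ∧ j ∉ lost) →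
      need.Pairwise (· < ·) →
      (∀ j, j ∈ need ↔ (1 ≤ j ∧ j ≤ n ∧ j ∈ lost ∧ j ∉ reserve ∧ k ≤ j)) →
      ((PySem.List.pyRange k (n+1) 1).foldl pvServe (v, ans)).2
        = ans + (n + 1 - k) - (need.foldl pvLend (G, 0)).2 := by
  intro m
  induction m with
  | zero =>
    intro k v G need ans hk h1 hlen H1 H2 H3 HS HN
    have hne : need = [] := by
      cases need with
      | nil => rfl
      | cons x t =>
        have := (HN x).1 (by simp)
        omega
    subst hne
    rw [PySem.List.pyRange_one_eq_nil (by omega)]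
    simp
    omega
  | succ m ih =>
    intro k v G need ans hk h1 hlen H1 H2 H3 HS HN
    rw [PySem.List.pyRange_one_cons (by omega), List.foldl_cons]
    have hkn : k ≤ n := by omega
    have hkl : k.toNat < v.size := by omega
    by_cases hneed : k ∈ lost ∧ k ∉ reserve
    · -- student k needs clothes; the need list starts with k
      have hvk : pvGet v k = 0 := by
        rw [H2 k (le_refl k) hkn, if_pos hneed]
      have hkG : k ∉ G := fun h => hneed.2 (H3 k h).2.2.1
      have hkneed : k ∈ need := (HN k).2 ⟨by omega, hkn, hneed.1, hneed.2, le_refl k⟩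
      obtain ⟨t, rfl⟩ : ∃ t, need = k :: t := by
        cases need with
        | nil => cases hkneed
        | cons x t =>
          rcases List.mem_cons.1 hkneed with h | h
          · exact ⟨t, by rw [h]⟩
          · have hx := (List.pairwise_cons.1 HS).1 k h
            have := (HN x).1 (by simp)
            omega
      have hrest_lt := (List.pairwise_cons.1 HS).1
      have HSt := (List.pairwise_cons.1 HS).2
      have HNt : ∀ j, j ∈ t ↔ (1 ≤ j ∧ j ≤ n ∧ j ∈ lost ∧ j ∉ reserve ∧ k + 1 ≤ j) := by
        intro j
        constructor
        · intro h
          have o := (HN j).1 (List.mem_cons_of_mem k h)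
          exact ⟨o.1, o.2.1, o.2.2.1, o.2.2.2.1, by have := hrest_lt j h; omega⟩
        · intro h
          have hj : j ∈ k :: t := (HN j).2 ⟨h.1, h.2.1, h.2.2.1, h.2.2.2.1, by omega⟩
          rcases List.mem_cons.1 hj with h' | h'
          · omega
          · exact h'
      have hleft := H1 (k-1) (by omega) (by omega) (by omega)
      rw [List.foldl_cons]
      by_cases hL : (k-1) ∈ G
      · -- borrow from the left neighbour
        have hl2 : pvGet v (k-1) = 2 := hleft.2 hL
        rw [pvServe_left v ans k hvk hl2 h1 hkl]
        have hlend : pvLend (G, 0) k = (PySem.Set.discard G (k-1), 0) := by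
          simp only [pvLend]
          rw [if_pos hL, PySem.Set.remove?_of_mem hL]
          rfl
        rw [hlend]
        have hv2get : ∀ j, 0 ≤ j →
            pvGet (pvSet (pvSet v k 1) (k-1) 1) j
              = if j = k-1 then 1 else if j = k then 1 else pvGet v j := by
          intro j hj
          rw [pvGet_pvSet _ _ _ _ (by omega) hj (by rw [size_pvSet]; omega)]
          by_cases h : j = k-1
          · rw [if_pos h, if_pos h]
          · rw [if_neg h, if_neg h, pvGet_pvSet _ _ _ _ (by omega) hj hkl]
        have hv2len : (pvSet (pvSet v k 1) (k-1) 1).size = (n+2).toNat := by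
          rw [size_pvSet, size_pvSet]; exact hlen
        have H1' : ∀ j, 0 ≤ j → j ≤ n + 1 → (k+1) - 1 ≤ j →
            (pvGet (pvSet (pvSet v k 1) (k-1) 1) j = 2
              ↔ j ∈ PySem.Set.discard G (k-1)) := by
          intro j hj hjn hjk
          rw [hv2get j hj, PySem.Set.mem_discard]
          by_cases h : j = k
          · subst h
            rw [if_neg (by omega), if_pos rfl]
            constructor
            · intro h'; exact absurd h' (by norm_num)
            · rintro ⟨h', _⟩; exact absurd h' hkG
          · rw [if_neg (by omega), if_neg h, H1 j hj hjn (by omega)]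
            exact ⟨fun h' => ⟨h', by omega⟩, fun h' => h'.1⟩
        have H2' : ∀ j, k + 1 ≤ j → j ≤ n →
            pvGet (pvSet (pvSet v k 1) (k-1) 1) j
              = (if j ∈ lost ∧ j ∉ reserve then 0
                 else if j ∈ PySem.Set.discard G (k-1) then 2 else 1) := by
          intro j hjk hjn
          rw [hv2get j (by omega), if_neg (by omega), if_neg (by omega), H2 j (by omega) hjn]
          by_cases hc : j ∈ lost ∧ j ∉ reserve
          · rw [if_pos hc, if_pos hc]
          · rw [if_neg hc, if_neg hc]
            by_cases hg : j ∈ G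
            · rw [if_pos hg, if_pos ((PySem.Set.mem_discard G (k-1) j).2 ⟨hg, by omega⟩)]
            · rw [if_neg hg, if_neg (fun h => hg ((PySem.Set.mem_discard G (k-1) j).1 h).1)]
        have H3' : ∀ j ∈ PySem.Set.discard G (k-1), 1 ≤ j ∧ j ≤ n ∧ j ∈ reserve ∧ j ∉ lost :=
          fun j hj => H3 j ((PySem.Set.mem_discard G (k-1) j).1 hj).1
        rw [ih (k+1) _ (PySem.Set.discard G (k-1)) t (ans+1) (by omega) (by omega) hv2len
              H1' H2' H3' HSt HNt]
        omega
      · have hright := H1 (k+1) (by omega) (by omega) (by omega)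
        have hnl : pvGet v (k-1) ≠ 2 := fun h => hL (hleft.1 h)
        by_cases hR : (k+1) ∈ G
        · -- borrow from the right neighbour
          have hr2 : pvGet v (k+1) = 2 := hright.2 hR
          have hk1n : k + 1 ≤ n := (H3 (k+1) hR).2.1
          have hkl2 : (k+1).toNat < v.size := by omega
          rw [pvServe_right v ans k hvk hnl hr2 h1 hkl hkl2]
          have hlend : pvLend (G, 0) k = (PySem.Set.discard G (k+1), 0) := by
            simp only [pvLend]
            rw [if_neg hL, if_pos hR, PySem.Set.remove?_of_mem hR]
            rfl
          rw [hlend]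
          have hv2get : ∀ j, 0 ≤ j →
              pvGet (pvSet (pvSet v k 1) (k+1) 1) j
                = if j = k+1 then 1 else if j = k then 1 else pvGet v j := by
            intro j hj
            rw [pvGet_pvSet _ _ _ _ (by omega) hj (by rw [size_pvSet]; omega)]
            by_cases h : j = k+1
            · rw [if_pos h, if_pos h]
            · rw [if_neg h, if_neg h, pvGet_pvSet _ _ _ _ (by omega) hj hkl]
          have hv2len : (pvSet (pvSet v k 1) (k+1) 1).size = (n+2).toNat := by
            rw [size_pvSet, size_pvSet]; exact hlen
          have H1' : ∀ j, 0 ≤ j → j ≤ n + 1 → (k+1) - 1 ≤ j →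
              (pvGet (pvSet (pvSet v k 1) (k+1) 1) j = 2
                ↔ j ∈ PySem.Set.discard G (k+1)) := by
            intro j hj hjn hjk
            rw [hv2get j hj, PySem.Set.mem_discard]
            by_cases h : j = k+1
            · subst h
              rw [if_pos rfl]
              constructor
              · intro h'; exact absurd h' (by norm_num)
              · rintro ⟨_, h'⟩; exact absurd rfl h'
            · rw [if_neg h]
              by_cases h' : j = k
              · subst h'
                rw [if_pos rfl]
                constructor
                · intro h''; exact absurd h'' (by norm_num)
                · rintro ⟨h'', _⟩; exact absurd h'' hkG
              · rw [if_neg h', H1 j hj hjn (by omega)]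
                exact ⟨fun h'' => ⟨h'', h⟩, fun h'' => h''.1⟩
          have H2' : ∀ j, k + 1 ≤ j → j ≤ n →
              pvGet (pvSet (pvSet v k 1) (k+1) 1) j
                = (if j ∈ lost ∧ j ∉ reserve then 0
                   else if j ∈ PySem.Set.discard G (k+1) then 2 else 1) := by
            intro j hjk hjn
            by_cases h : j = k+1
            · subst h
              have hres := (H3 (k+1) hR).2.2.1
              rw [hv2get (k+1) (by omega), if_pos rfl, if_neg (fun hc => hc.2 hres),
                  if_neg (fun hc => ((PySem.Set.mem_discard G (k+1) (k+1)).1 hc).2 rfl)]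
            · rw [hv2get j (by omega), if_neg h, if_neg (by omega), H2 j (by omega) hjn]
              by_cases hc : j ∈ lost ∧ j ∉ reserve
              · rw [if_pos hc, if_pos hc]
              · rw [if_neg hc, if_neg hc]
                by_cases hg : j ∈ G
                · rw [if_pos hg, if_pos ((PySem.Set.mem_discard G (k+1) j).2 ⟨hg, h⟩)]
                · rw [if_neg hg, if_neg (fun hh => hg ((PySem.Set.mem_discard G (k+1) j).1 hh).1)]
          have H3' : ∀ j ∈ PySem.Set.discard G (k+1), 1 ≤ j ∧ j ≤ n ∧ j ∈ reserve ∧ j ∉ lost :=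
            fun j hj => H3 j ((PySem.Set.mem_discard G (k+1) j).1 hj).1
          rw [ih (k+1) _ (PySem.Set.discard G (k+1)) t (ans+1) (by omega) (by omega) hv2len
                H1' H2' H3' HSt HNt]
          omega
        · -- no lender: student k stays without clothes
          have hnr : pvGet v (k+1) ≠ 2 := fun h => hR (hright.1 h)
          rw [pvServe_none v ans k hvk hnl hnr]
          have hlend : pvLend (G, 0) k = (G, 1) := by
            simp only [pvLend]
            rw [if_neg hL, if_neg hR]
            norm_num
          rw [hlend, lend_shift t G 1]
          have H1' : ∀ j, 0 ≤ j → j ≤ n + 1 → (k+1) - 1 ≤ j →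
              (pvGet v j = 2 ↔ j ∈ G) :=
            fun j hj hjn hjk => H1 j hj hjn (by omega)
          have H2' : ∀ j, k + 1 ≤ j → j ≤ n →
              pvGet v j
                = (if j ∈ lost ∧ j ∉ reserve then 0 else if j ∈ G then 2 else 1) :=
            fun j hjk hjn => H2 j (by omega) hjn
          rw [ih (k+1) v G t ans (by omega) (by omega) hlen H1' H2' H3 HSt HNt]
          omega
    · -- student k already has clothes
      have hvk : pvGet v k = if k ∈ G then 2 else 1 := by
        rw [H2 k (le_refl k) hkn, if_neg hneed]
      have hpos : 0 < pvGet v k := by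
        rw [hvk]; split_ifs <;> norm_num
      rw [pvServe_has v ans k hpos]
      have HN' : ∀ j, j ∈ need ↔ (1 ≤ j ∧ j ≤ n ∧ j ∈ lost ∧ j ∉ reserve ∧ k + 1 ≤ j) := by
        intro j
        rw [HN j]
        constructor
        · intro h
          have hjk : j ≠ k := fun e => hneed (e ▸ ⟨h.2.2.1, h.2.2.2.1⟩)
          exact ⟨h.1, h.2.1, h.2.2.1, h.2.2.2.1, by omega⟩
        · intro h
          exact ⟨h.1, h.2.1, h.2.2.1, h.2.2.2.1, by omega⟩
      have H1' : ∀ j, 0 ≤ j → j ≤ n + 1 → (k+1) - 1 ≤ j →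
          (pvGet v j = 2 ↔ j ∈ G) :=
        fun j hj hjn hjk => H1 j hj hjn (by omega)
      have H2' : ∀ j, k + 1 ≤ j → j ≤ n →
          pvGet v j
            = (if j ∈ lost ∧ j ∉ reserve then 0 else if j ∈ G then 2 else 1) :=
        fun j hjk hjn => H2 j (by omega) hjn
      rw [ih (k+1) v G need (ans+1) (by omega) (by omega) hlen H1' H2' H3 HS HN']
      omega

-- ===== VERDICT (by name: the statement is the Claim_ definition above) =====
theorem solution_spec : Claim_equal_solution := by
  intro n lost reserve hdom hpre
  unfold Spec_solution
  have hn : 0 ≤ n := hpre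
  -- the filled visited array
  obtain ⟨hlen0, hget0⟩ := fill_spec n lost reserve n.toNat 1
    (([(0:Int)] ++ List.replicate n.toNat 1 ++ [0]).toArray) (by omega) (by omega)
    (by simp; omega)
  have hget : ∀ j, 0 ≤ j →
      pvGet ((PySem.List.pyRange 1 (n+1) 1).foldl (pvFill lost reserve)
        (([(0:Int)] ++ List.replicate n.toNat 1 ++ [0]).toArray)) j
        = if 1 ≤ j ∧ j ≤ n then
            1 + (if j ∈ reserve then 1 else 0) - (if j ∈ lost then 1 else 0)
          else 0 := by
    intro j hj
    rw [hget0 j hj, pvGet_vInit n j hj]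
    by_cases hc : 1 ≤ j ∧ j ≤ n
    · rw [if_pos hc, if_pos hc, if_pos hc]
    · rw [if_neg hc, if_neg hc, if_neg hc]
  -- membership in the give set
  have hGmem : ∀ j : Int, j ∈ PySem.Set.ofList (reserve.filter (fun x => decide (1 ≤ x ∧ x ≤ n ∧ x ∉ lost)))
      ↔ (1 ≤ j ∧ j ≤ n ∧ j ∈ reserve ∧ j ∉ lost) := by
    intro j
    rw [PySem.Set.mem_ofList, List.mem_filter]
    simp only [decide_eq_true_eq]
    constructor
    · rintro ⟨h1, h2, h3, h4⟩; exact ⟨h2, h3, h1, h4⟩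
    · rintro ⟨h1, h2, h3, h4⟩; exact ⟨h3, h1, h2, h4⟩
  -- the need list
  have hNmem : ∀ j : Int, j ∈ PySem.List.sorted (PySem.Set.ofList (lost.filter (fun x => decide (1 ≤ x ∧ x ≤ n ∧ x ∉ reserve)))) (fun x => x) false
      ↔ (1 ≤ j ∧ j ≤ n ∧ j ∈ lost ∧ j ∉ reserve ∧ 1 ≤ j) := by
    intro j
    rw [PySem.List.mem_sorted, PySem.Set.mem_ofList, List.mem_filter]
    simp only [decide_eq_true_eq]
    constructor
    · rintro ⟨h1, h2, h3, h4⟩; exact ⟨h2, h3, h1, h4, h2⟩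
    · rintro ⟨h1, h2, h3, h4, _⟩; exact ⟨h3, h1, h2, h4⟩
  have hNsorted := PySem.List.sorted_ofList_pairwise_lt (lost.filter (fun x => decide (1 ≤ x ∧ x ≤ n ∧ x ∉ reserve)))
  have H1 : ∀ j, 0 ≤ j → j ≤ n + 1 → (1:Int) - 1 ≤ j →
      (pvGet ((PySem.List.pyRange 1 (n+1) 1).foldl (pvFill lost reserve)
        (([(0:Int)] ++ List.replicate n.toNat 1 ++ [0]).toArray)) j = 2
        ↔ j ∈ PySem.Set.ofList (reserve.filter (fun x => decide (1 ≤ x ∧ x ≤ n ∧ x ∉ lost)))) := by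
    intro j hj hjn _
    rw [hget j hj, hGmem j]
    by_cases hc : 1 ≤ j ∧ j ≤ n
    · rw [if_pos hc]
      by_cases hr : j ∈ reserve <;> by_cases hl : j ∈ lost <;>
        simp [hr, hl, hc.1, hc.2]
    · rw [if_neg hc]
      constructor
      · intro h; exact absurd h (by norm_num)
      · intro h; exact absurd ⟨h.1, h.2.1⟩ hc
  have H2 : ∀ j, (1:Int) ≤ j → j ≤ n →
      pvGet ((PySem.List.pyRange 1 (n+1) 1).foldl (pvFill lost reserve)
        (([(0:Int)] ++ List.replicate n.toNat 1 ++ [0]).toArray)) j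
        = (if j ∈ lost ∧ j ∉ reserve then 0
           else if j ∈ PySem.Set.ofList (reserve.filter (fun x => decide (1 ≤ x ∧ x ≤ n ∧ x ∉ lost))) then 2 else 1) := by
    intro j hj1 hjn
    rw [hget j (by omega), if_pos ⟨hj1, hjn⟩]
    by_cases hl : j ∈ lost <;> by_cases hr : j ∈ reserve <;>
      simp [hl, hr, hj1, hjn]
  have H3 : ∀ j ∈ PySem.Set.ofList (reserve.filter (fun x => decide (1 ≤ x ∧ x ≤ n ∧ x ∉ lost))),
      1 ≤ j ∧ j ≤ n ∧ j ∈ reserve ∧ j ∉ lost := fun j hj => (hGmem j).1 hj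
  have := main_sim n lost reserve n.toNat 1
    ((PySem.List.pyRange 1 (n+1) 1).foldl (pvFill lost reserve)
      (([(0:Int)] ++ List.replicate n.toNat 1 ++ [0]).toArray))
    (PySem.Set.ofList (reserve.filter (fun x => decide (1 ≤ x ∧ x ≤ n ∧ x ∉ lost))))
    (PySem.List.sorted (PySem.Set.ofList (lost.filter (fun x => decide (1 ≤ x ∧ x ≤ n ∧ x ∉ reserve)))) (fun x => x) false)
    0 (by omega) (by omega) hlen0 H1 H2 H3 hNsorted hNmem
  have hA : solution n lost reserve
      = ((PySem.List.pyRange 1 (n+1) 1).foldl pvServe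
          ((PySem.List.pyRange 1 (n+1) 1).foldl (pvFill lost reserve)
            (([(0:Int)] ++ List.replicate n.toNat 1 ++ [0]).toArray), 0)).2 := rfl
  have hB : solution_alt n lost reserve
      = n - ((PySem.List.sorted (PySem.Set.ofList (lost.filter (fun x => decide (1 ≤ x ∧ x ≤ n ∧ x ∉ reserve)))) (fun x => x) false).foldl pvLend
          (PySem.Set.ofList (reserve.filter (fun x => decide (1 ≤ x ∧ x ≤ n ∧ x ∉ lost))), 0)).2 := rfl
  rw [hA, hB, this]
  omega
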